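-- pv_equiv track=rewrite | github.com/ajaybabusappa/31r_python | 15-03.py | dup
-- ===== SOURCE A (Python) =====
-- def dup(user_input):
--     temp = user_input
--     list1 = [] #[4, 3, 2, 0]
--     while temp > 0:
--         remen = temp % 10 #4 #3 #2 #0 #7
--         if remen in list1:
--             return True
--         else:
--             list1.append(remen)
--         temp = temp // 10 #2023 #202 #20 #2 #0
--     return False
-- ===== SOURCE B (Python) =====
-- def dup(user_input):
--     temp = user_input
--     digits = []
--     while temp > 0:
--         digits.append(temp % 10)
--         temp //= 10
--     digits.sort()
--     return any(a == b for a, b in zip(digits, digits[1:]))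
-- ===== Notes on version B (the rewrite author's own statement) =====
-- stated objective: alternative
-- what changed: Replaces the online early-exit duplicate check (membership test against a growing list inside the extraction loop) with a two-phase gather-then-decide: collect all digits, sort them, and scan adjacent pairs for equality.
import Mathlib
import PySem

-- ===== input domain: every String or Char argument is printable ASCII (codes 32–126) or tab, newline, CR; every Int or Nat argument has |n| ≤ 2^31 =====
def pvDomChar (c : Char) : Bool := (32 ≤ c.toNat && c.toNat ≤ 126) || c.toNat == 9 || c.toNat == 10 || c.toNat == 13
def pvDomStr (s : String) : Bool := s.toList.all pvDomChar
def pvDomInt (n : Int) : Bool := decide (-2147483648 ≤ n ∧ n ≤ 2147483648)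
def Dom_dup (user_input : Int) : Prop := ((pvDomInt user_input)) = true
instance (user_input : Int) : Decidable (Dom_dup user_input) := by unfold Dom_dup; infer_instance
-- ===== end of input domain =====

-- B replaces A's online early-exit duplicate check with gather-all-digits, sort, scan adjacent pairs (alternative decomposition, same digits-extraction loop).


-- ===== PORT A =====
-- the while loop of A: state (temp, list1), early `return True` when the digit was seen
def dupGo (temp : Int) (list1 : List Int) : Bool :=
  if temp > 0 then
    let remen := PySem.Int.mod temp 10
    if list1.contains remen then true
    else dupGo (PySem.Int.floordiv temp 10) (list1 ++ [remen])
  else false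
  termination_by temp.toNat
  decreasing_by
    rw [PySem.Int.floordiv_eq_ediv_of_pos (by omega : (0:Int) < 10)]
    omega

def dup (user_input : Int) : Bool := dupGo user_input []

-- ===== PORT B =====
-- the while loop of B: collect the digits (no test inside the loop)
def digitsGo (temp : Int) (digits : List Int) : List Int :=
  if temp > 0 then
    digitsGo (PySem.Int.floordiv temp 10) (digits ++ [PySem.Int.mod temp 10])
  else digits
  termination_by temp.toNat
  decreasing_by
    rw [PySem.Int.floordiv_eq_ediv_of_pos (by omega : (0:Int) < 10)]
    omega

def dup_alt (user_input : Int) : Bool :=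
  let digits := PySem.List.sorted (digitsGo user_input []) (fun x => x) false
  -- any(a == b for a, b in zip(digits, digits[1:])); digits[1:] of a list is .drop 1
  ((digits.zip (digits.drop 1)).any (fun p => p.1 == p.2))

-- ===== PRECONDITION & SPEC =====
def Spec_dup (user_input : Int) (out : Bool) : Prop := out = dup_alt user_input
instance (user_input : Int) (out : Bool) : Decidable (Spec_dup user_input out) := by unfold Spec_dup; infer_instance

-- ===== CLAIM (what is proved, stated in full; the proofs are below) =====
def Claim_equal_dup : Prop := ∀ (user_input : Int), Dom_dup user_input → Spec_dup user_input (dup user_input)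

-- ===== LEMMAS AND PROOFS =====

-- digitsGo accumulates on the right
theorem digitsGo_acc_aux (n : Nat) : ∀ (temp : Int), temp.toNat ≤ n → ∀ acc : List Int,
    digitsGo temp acc = acc ++ digitsGo temp [] := by
  induction n with
  | zero =>
      intro t ht acc
      have h : ¬ t > 0 := by omega
      rw [digitsGo, if_neg h, digitsGo, if_neg h]; simp
  | succ n ih =>
      intro t ht acc
      by_cases h : t > 0
      · have ht' : (PySem.Int.floordiv t 10).toNat ≤ n := by
          rw [PySem.Int.floordiv_eq_ediv_of_pos (by omega : (0:Int) < 10)]; omega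
        rw [digitsGo, if_pos h, ih _ ht' (acc ++ [PySem.Int.mod t 10])]
        conv_rhs => rw [digitsGo, if_pos h, ih _ ht' ([] ++ [PySem.Int.mod t 10])]
        simp
      · rw [digitsGo, if_neg h, digitsGo, if_neg h]; simp

theorem digitsGo_acc (temp : Int) (acc : List Int) :
    digitsGo temp acc = acc ++ digitsGo temp [] :=
  digitsGo_acc_aux temp.toNat temp le_rfl acc

-- A's loop returns true exactly when Nodup of seen ++ remaining digits is violated
theorem dupGo_eq_aux (n : Nat) : ∀ (temp : Int), temp.toNat ≤ n → ∀ seen : List Int, seen.Nodup →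
    (dupGo temp seen = true ↔ ¬ (seen ++ digitsGo temp []).Nodup) := by
  induction n with
  | zero =>
      intro t ht seen hn
      have h : ¬ t > 0 := by omega
      rw [dupGo, if_neg h, digitsGo, if_neg h]
      simp [hn]
  | succ n ih =>
      intro t ht seen hn
      by_cases h : t > 0
      · have ht' : (PySem.Int.floordiv t 10).toNat ≤ n := by
          rw [PySem.Int.floordiv_eq_ediv_of_pos (by omega : (0:Int) < 10)]; omega
        rw [dupGo, if_pos h]
        conv_rhs => rw [digitsGo, if_pos h,
          digitsGo_acc (PySem.Int.floordiv t 10) ([] ++ [PySem.Int.mod t 10])]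
        by_cases hc : PySem.Int.mod t 10 ∈ seen
        · rw [if_pos (by simpa using hc)]
          refine iff_of_true rfl ?_
          intro hnod
          exact List.disjoint_of_nodup_append hnod hc (by simp)
        · have hn' : (seen ++ [PySem.Int.mod t 10]).Nodup := by
            refine List.Nodup.append hn (by simp) ?_
            intro x hx hx2
            simp only [List.mem_singleton] at hx2
            subst hx2; exact hc hx
          rw [if_neg (by simpa using hc), ih _ ht' _ hn']
          simp [List.append_assoc]
      · rw [dupGo, if_neg h, digitsGo, if_neg h]
        simp [hn]

-- adjacent-equality scan on a ≤-sorted list detects exactly a violation of Nodup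
theorem adj_scan_eq (l : List Int) (hs : l.Pairwise (· ≤ ·)) :
    ((l.zip (l.drop 1)).any (fun p => p.1 == p.2)) = true ↔ ¬ l.Nodup := by
  induction l with
  | nil => simp
  | cons a t ih =>
      cases t with
      | nil => simp
      | cons b t' =>
          have hs' : (b :: t').Pairwise (· ≤ ·) := hs.tail
          have hab : a ≤ b := (List.pairwise_cons.mp hs).1 b (by simp)
          simp only [List.drop_succ_cons, List.drop_zero] at ih ⊢
          rw [List.zip_cons_cons, List.any_cons]
          by_cases hEq : a = b
          · subst hEq
            simp [List.nodup_cons]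
          · have haNot : a ∉ b :: t' := by
              intro hmem
              rcases List.mem_cons.mp hmem with h1 | h2
              · exact hEq h1
              · have hb : b ≤ a := (List.pairwise_cons.mp hs').1 a h2
                exact hEq (le_antisymm hab hb)
            rw [(by simp [hEq] : (((a, b).1 : Int) == (a, b).2) = false), Bool.false_or, ih hs']
            simp [List.nodup_cons, haNot]

-- ===== VERDICT (by name: the statement is the Claim_ definition above) =====
theorem dup_spec : Claim_equal_dup := by
  intro u _
  unfold Spec_dup dup dup_alt
  set digs := digitsGo u [] with hd
  set s := PySem.List.sorted digs (fun x => x) false with hsrt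
  have hperm : s.Perm digs := PySem.List.sorted_perm digs (fun x => x) false
  have hpw : s.Pairwise (· ≤ ·) := by
    simpa using PySem.List.sorted_pairwise digs (fun x => x)
  have hA : dupGo u [] = true ↔ ¬ digs.Nodup := by
    simpa using dupGo_eq_aux u.toNat u le_rfl [] (by simp)
  have hB : ((s.zip (s.drop 1)).any (fun p => p.1 == p.2)) = true ↔ ¬ s.Nodup :=
    adj_scan_eq s hpw
  have hnd : s.Nodup ↔ digs.Nodup := hperm.nodup_iff
  rw [Bool.eq_iff_iff, hA, hB, hnd]
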